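-- pv_equiv track=rewrite | github.com/myeongHeonn/Algorithm | 프로그래머스/2/250136. ［PCCP 기출문제］ 2번 ／ 석유 시추/［PCCP 기출문제］ 2번 ／ 석유 시추.py | solution
-- ===== SOURCE A (Python) =====
-- from collections import deque
--
-- def solution(land):
--     n, m = len(land), len(land[0])
--     dy = [-1, 1, 0, 0]
--     dx = [0, 0, -1, 1]
--
--     visited = [[False for _ in range(m)] for _ in range(n)]
--     label_map = [[-1 for _ in range(m)] for _ in range(n)]
--     label_volume = dict()
--     label = 0
--
--     for i in range(n):
--         for j in range(m):
--             if not visited[i][j] and land[i][j] == 1: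
--                 label_map[i][j] = label
--                 queue = deque()
--                 queue.append((i, j))
--                 visited[i][j] = True
--                 volume = 0
--
--                 while queue:
--                     volume += 1
--                     y, x = queue.popleft()
--
--                     for k in range(4):
--                         ny = y + dy[k]
--                         nx = x + dx[k]
--
--                         if 0 <= ny < n and 0 <= nx < m and not visited[ny][nx] and land[ny][nx] == 1:
--                             queue.append((ny, nx))
--                             label_map[ny][nx] = label
--                             visited[ny][nx] = True
--
--                 label_volume[label] = volume
--                 label += 1
--
--     total_volume = 0
--     for j in range(m):
--         column = set()
--         column_volume = 0
--         for i in range(n):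
--             if label_map[i][j] != -1:
--                 column.add(label_map[i][j])
--
--         if column:
--             for v in column:
--                 column_volume += label_volume[v]
--
--         total_volume = max(total_volume, column_volume)
--
--     return total_volume
-- ===== SOURCE B (Python) =====
-- from collections import deque
--
-- def solution(land):
--     n, m = len(land), len(land[0])
--     best = 0
--     for j in range(m):
--         seeds = [(i, j) for i in range(n) if land[i][j] == 1]
--         visited = set(seeds)
--         queue = deque(seeds)
--         count = 0
--         while queue:
--             y, x = queue.popleft()
--             count += 1
--             for ny, nx in ((y - 1, x), (y + 1, x), (y, x - 1), (y, x + 1)):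
--                 if 0 <= ny < n and 0 <= nx < m and (ny, nx) not in visited and land[ny][nx] == 1:
--                     visited.add((ny, nx))
--                     queue.append((ny, nx))
--         best = max(best, count)
--     return best
-- ===== Notes on version B (the rewrite author's own statement) =====
-- stated objective: simpler
-- what changed: A labels every connected component once with a BFS flood fill, stores component sizes in a dict, and then per column deduplicates labels in a set and sums their sizes; B drops the labelling entirely and, for each column, runs one multi-source BFS seeded with that column's oil cells and simply counts the visited cells.
import Mathlib
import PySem

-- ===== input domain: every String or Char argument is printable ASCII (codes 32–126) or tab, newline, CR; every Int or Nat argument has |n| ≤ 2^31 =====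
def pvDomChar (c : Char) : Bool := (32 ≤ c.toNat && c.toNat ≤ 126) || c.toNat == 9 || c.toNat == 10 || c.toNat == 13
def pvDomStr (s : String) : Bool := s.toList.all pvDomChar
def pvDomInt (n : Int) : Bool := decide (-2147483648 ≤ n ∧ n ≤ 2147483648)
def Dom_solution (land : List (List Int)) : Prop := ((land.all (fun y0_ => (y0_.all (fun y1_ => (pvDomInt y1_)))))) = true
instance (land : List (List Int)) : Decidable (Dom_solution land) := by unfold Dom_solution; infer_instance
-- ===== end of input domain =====

-- B replaces A's label-the-components-then-sum-per-column algorithm by a per-column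
-- multi-source flood-fill count; same return value, B is shorter and plainer (not faster).

-- ===== PORT A =====
-- shared cell accessor: land[y][x] under the 0 ≤ y < n, 0 ≤ x < m guards of both Pythons
def pvCellAt (land : List (List Int)) (y x : Int) : Int :=
  match PySem.List.pyGet? land y with
  | some row => (PySem.List.pyGet? row x).getD 0
  | none => 0

def pvDY : List Int := [-1, 1, 0, 0]
def pvDX : List Int := [0, 0, -1, 1]

def pvNbrs (c : Int × Int) : List (Int × Int) :=
  [(c.1 - 1, c.2), (c.1 + 1, c.2), (c.1, c.2 - 1), (c.1, c.2 + 1)]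

abbrev pvGood (land : List (List Int)) (n m : Int) (b : Int × Int) : Prop :=
  0 ≤ b.1 ∧ b.1 < n ∧ 0 ≤ b.2 ∧ b.2 < m ∧ pvCellAt land b.1 b.2 = 1

-- the cells a neighbour scan appends: in-bounds oil cells not yet visited
def pvNewOf (land : List (List Int)) (n m : Int) (v : List (Int × Int))
    (cells : List (Int × Int)) : List (Int × Int) :=
  cells.filter (fun b => decide (pvGood land n m b ∧ b ∉ v))

def pvGridL (n m : Int) : List (Int × Int) :=
  (List.range n.toNat).flatMap (fun (i : Nat) => (List.range m.toNat).map (fun (j : Nat) => ((i : Int), (j : Int))))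

def pvUnvis (n m : Int) (vis : List (Int × Int)) : Nat :=
  ((pvGridL n m).filter (fun c => decide (c ∉ vis))).length

-- ----- termination helpers (cited by the ports' decreasing_by) -----
lemma pvMapZip (y x : Int) :
    (pvDY.zip pvDX).map (fun d => (y + d.1, x + d.2)) = pvNbrs (y, x) := by
  show [((y + -1 : Int), (x + 0 : Int)), (y + 1, x + 0), (y + 0, x + -1), (y + 0, x + 1)] = _
  simp only [pvNbrs, List.cons.injEq, Prod.mk.injEq]
  and_intros <;> first | exact trivial | ring

lemma pvNbrs_nodup (c : Int × Int) : (pvNbrs c).Nodup := by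
  obtain ⟨a, b⟩ := c
  simp [pvNbrs, Prod.ext_iff]
  omega

lemma mem_pvGridL (n m : Int) (c : Int × Int) :
    c ∈ pvGridL n m ↔ 0 ≤ c.1 ∧ c.1 < n ∧ 0 ≤ c.2 ∧ c.2 < m := by
  obtain ⟨a, b⟩ := c
  simp only [pvGridL, List.mem_flatMap, List.mem_map, List.mem_range, Prod.mk.injEq]
  constructor
  · rintro ⟨i, hi, j, hj, rfl, rfl⟩
    omega
  · rintro ⟨h1, h2, h3, h4⟩
    exact ⟨a.toNat, by omega, ⟨b.toNat, by omega, by omega, by omega⟩⟩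

lemma pvUnvis_cons_lt (n m : Int) (v : List (Int × Int)) (b : Int × Int)
    (hb : b ∈ pvGridL n m) (hv : b ∉ v) : pvUnvis n m (b :: v) < pvUnvis n m v := by
  unfold pvUnvis
  have h1 : (pvGridL n m).filter (fun c => decide (c ∉ b :: v))
      = ((pvGridL n m).filter (fun c => decide (c ∉ v))).filter (fun c => decide (c ≠ b)) := by
    rw [List.filter_filter]
    apply List.filter_congr
    intro x _
    by_cases hxb : x = b <;> by_cases hxv : x ∈ v <;> simp [hxb, hxv]
  rw [h1]
  apply List.length_filter_lt_length_iff_exists.mpr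
  exact ⟨b, by simp [List.mem_filter, hb, hv], by simp⟩

lemma pvUnvis_append_le (n m : Int) :
    ∀ (L v : List (Int × Int)), L.Nodup → (∀ b ∈ L, b ∈ pvGridL n m ∧ b ∉ v) →
      pvUnvis n m (L.reverse ++ v) + L.length ≤ pvUnvis n m v := by
  intro L
  induction L with
  | nil => simp
  | cons b L ih =>
    intro v hnd hb
    have hrw : (b :: L).reverse ++ v = L.reverse ++ (b :: v) := by
      simp
    rw [hrw]
    have h1 := ih (b :: v) hnd.of_cons (by
      intro t ht
      refine ⟨(hb t (by simp [ht])).1, ?_⟩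
      have := (hb t (by simp [ht])).2
      have hne : t ≠ b := by
        intro h; exact (List.nodup_cons.mp hnd).1 (h ▸ ht)
      simp [hne, this])
    have h2 := pvUnvis_cons_lt n m v b (hb b (by simp)).1 (hb b (by simp)).2
    simp only [List.length_cons]
    omega

-- exact effect of A's 4-neighbour scan (for any delta list with distinct targets)
lemma pvScanA_spec (land : List (List Int)) (n m lbl y x : Int) :
    ∀ (ds : List (Int × Int)) (q v : List (Int × Int)) (lm : Int × Int → Int),
      ((ds.map (fun d => (y + d.1, x + d.2))).Nodup) →
      (ds.foldl (fun (st : List (Int × Int) × List (Int × Int) × (Int × Int → Int)) (d : Int × Int) =>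
        if 0 ≤ y + d.1 ∧ y + d.1 < n ∧ 0 ≤ x + d.2 ∧ x + d.2 < m ∧ (y + d.1, x + d.2) ∉ st.2.1 ∧ pvCellAt land (y + d.1) (x + d.2) = 1 then
          (st.1 ++ [(y + d.1, x + d.2)], (y + d.1, x + d.2) :: st.2.1, fun c => if c = (y + d.1, x + d.2) then lbl else st.2.2 c)
        else st) (q, v, lm)).1 = q ++ pvNewOf land n m v (ds.map (fun d => (y + d.1, x + d.2))) ∧
      (ds.foldl (fun (st : List (Int × Int) × List (Int × Int) × (Int × Int → Int)) (d : Int × Int) =>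
        if 0 ≤ y + d.1 ∧ y + d.1 < n ∧ 0 ≤ x + d.2 ∧ x + d.2 < m ∧ (y + d.1, x + d.2) ∉ st.2.1 ∧ pvCellAt land (y + d.1) (x + d.2) = 1 then
          (st.1 ++ [(y + d.1, x + d.2)], (y + d.1, x + d.2) :: st.2.1, fun c => if c = (y + d.1, x + d.2) then lbl else st.2.2 c)
        else st) (q, v, lm)).2.1 = (pvNewOf land n m v (ds.map (fun d => (y + d.1, x + d.2)))).reverse ++ v ∧
      ∀ c, (ds.foldl (fun (st : List (Int × Int) × List (Int × Int) × (Int × Int → Int)) (d : Int × Int) =>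
        if 0 ≤ y + d.1 ∧ y + d.1 < n ∧ 0 ≤ x + d.2 ∧ x + d.2 < m ∧ (y + d.1, x + d.2) ∉ st.2.1 ∧ pvCellAt land (y + d.1) (x + d.2) = 1 then
          (st.1 ++ [(y + d.1, x + d.2)], (y + d.1, x + d.2) :: st.2.1, fun c => if c = (y + d.1, x + d.2) then lbl else st.2.2 c)
        else st) (q, v, lm)).2.2 c = if c ∈ pvNewOf land n m v (ds.map (fun d => (y + d.1, x + d.2))) then lbl else lm c := by
  intro ds
  induction ds with
  | nil => intro q v lm _; simp [pvNewOf]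
  | cons d ds ih =>
    intro q v lm hnd
    simp only [List.map_cons, List.nodup_cons] at hnd
    set b : Int × Int := (y + d.1, x + d.2) with hbdef
    by_cases hc : pvGood land n m b ∧ b ∉ v
    · have hcond : 0 ≤ y + d.1 ∧ y + d.1 < n ∧ 0 ≤ x + d.2 ∧ x + d.2 < m ∧
          (y + d.1, x + d.2) ∉ v ∧ pvCellAt land (y + d.1) (x + d.2) = 1 := by
        obtain ⟨⟨g1, g2, g3, g4, g5⟩, g6⟩ := hc
        exact ⟨g1, g2, g3, g4, g6, g5⟩
      have hfil : pvNewOf land n m v (b :: ds.map (fun d => (y + d.1, x + d.2)))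
          = b :: pvNewOf land n m (b :: v) (ds.map (fun d => (y + d.1, x + d.2))) := by
        unfold pvNewOf
        rw [List.filter_cons_of_pos (by simp [hc.1, hc.2])]
        congr 1
        apply List.filter_congr
        intro t ht
        have hne : t ≠ b := fun h => hnd.1 (h ▸ ht)
        simp [List.mem_cons, hne]
      have ih' := ih (q ++ [b]) (b :: v) (fun c => if c = b then lbl else lm c) hnd.2
      simp only [List.foldl_cons, List.map_cons, ← hbdef]
      rw [if_pos hcond, hfil]
      refine ⟨?_, ?_, ?_⟩
      · rw [ih'.1]; simp
      · rw [ih'.2.1]; simp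
      · intro c
        rw [ih'.2.2 c]
        by_cases h1 : c ∈ pvNewOf land n m (b :: v) (ds.map (fun d => (y + d.1, x + d.2)))
        · simp [h1]
        · by_cases h2 : c = b <;> simp [h1, h2]
    · have hcond : ¬ (0 ≤ y + d.1 ∧ y + d.1 < n ∧ 0 ≤ x + d.2 ∧ x + d.2 < m ∧
          (y + d.1, x + d.2) ∉ v ∧ pvCellAt land (y + d.1) (x + d.2) = 1) := by
        intro ⟨g1, g2, g3, g4, g5, g6⟩
        exact hc ⟨⟨g1, g2, g3, g4, g6⟩, g5⟩
      have hfil : pvNewOf land n m v (b :: ds.map (fun d => (y + d.1, x + d.2)))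
          = pvNewOf land n m v (ds.map (fun d => (y + d.1, x + d.2))) := by
        unfold pvNewOf
        rw [List.filter_cons_of_neg (by simpa using hc)]
      simp only [List.foldl_cons, List.map_cons, ← hbdef]
      rw [if_neg hcond, hfil]
      exact ih q v lm hnd.2

-- exact effect of B's 4-neighbour scan
lemma pvScanB_spec (land : List (List Int)) (n m : Int) :
    ∀ (es : List (Int × Int)) (q v : List (Int × Int)), es.Nodup →
      (es.foldl (fun (st : List (Int × Int) × List (Int × Int)) (d : Int × Int) =>
        if 0 ≤ d.1 ∧ d.1 < n ∧ 0 ≤ d.2 ∧ d.2 < m ∧ d ∉ st.2 ∧ pvCellAt land d.1 d.2 = 1 then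
          (st.1 ++ [d], d :: st.2)
        else st) (q, v)).1 = q ++ pvNewOf land n m v es ∧
      (es.foldl (fun (st : List (Int × Int) × List (Int × Int)) (d : Int × Int) =>
        if 0 ≤ d.1 ∧ d.1 < n ∧ 0 ≤ d.2 ∧ d.2 < m ∧ d ∉ st.2 ∧ pvCellAt land d.1 d.2 = 1 then
          (st.1 ++ [d], d :: st.2)
        else st) (q, v)).2 = (pvNewOf land n m v es).reverse ++ v := by
  intro es
  induction es with
  | nil => intro q v _; simp [pvNewOf]
  | cons b es ih =>
    intro q v hnd
    rw [List.nodup_cons] at hnd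
    by_cases hc : pvGood land n m b ∧ b ∉ v
    · have hcond : 0 ≤ b.1 ∧ b.1 < n ∧ 0 ≤ b.2 ∧ b.2 < m ∧ b ∉ v ∧ pvCellAt land b.1 b.2 = 1 := by
        obtain ⟨⟨g1, g2, g3, g4, g5⟩, g6⟩ := hc
        exact ⟨g1, g2, g3, g4, g6, g5⟩
      have hfil : pvNewOf land n m v (b :: es) = b :: pvNewOf land n m (b :: v) es := by
        unfold pvNewOf
        rw [List.filter_cons_of_pos (by simp [hc.1, hc.2])]
        congr 1
        apply List.filter_congr
        intro t ht
        have hne : t ≠ b := fun h => hnd.1 (h ▸ ht)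
        simp [List.mem_cons, hne]
      have ih' := ih (q ++ [b]) (b :: v) hnd.2
      simp only [List.foldl_cons]
      rw [if_pos hcond]
      exact ⟨by rw [ih'.1, hfil]; simp, by rw [ih'.2, hfil]; simp⟩
    · have hcond : ¬ (0 ≤ b.1 ∧ b.1 < n ∧ 0 ≤ b.2 ∧ b.2 < m ∧ b ∉ v ∧ pvCellAt land b.1 b.2 = 1) := by
        intro ⟨g1, g2, g3, g4, g5, g6⟩
        exact hc ⟨⟨g1, g2, g3, g4, g6⟩, g5⟩
      have hfil : pvNewOf land n m v (b :: es) = pvNewOf land n m v es := by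
        unfold pvNewOf
        rw [List.filter_cons_of_neg (by simpa using hc)]
      simp only [List.foldl_cons]
      rw [if_neg hcond, hfil]
      exact ih q v hnd.2

lemma pvNewOf_facts (land : List (List Int)) (n m : Int) (v cells : List (Int × Int))
    (hnd : cells.Nodup) :
    (pvNewOf land n m v cells).Nodup ∧
      ∀ b ∈ pvNewOf land n m v cells, pvGood land n m b ∧ b ∉ v ∧ b ∈ cells := by
  refine ⟨hnd.filter _, ?_⟩
  intro b hb
  rw [pvNewOf, List.mem_filter, decide_eq_true_eq] at hb
  exact ⟨hb.2.1, hb.2.2, hb.1⟩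

-- A's inner BFS while-loop (deque of cells; vis is the set of visited cells,
-- lm the label_map as a function, vol the pop counter)
def bfsA (land : List (List Int)) (n m lbl : Int)
    (queue vis : List (Int × Int)) (lm : Int × Int → Int) (vol : Int) :
    List (Int × Int) × (Int × Int → Int) × Int :=
  match queue with
  | [] => (vis, lm, vol)
  | (y, x) :: rest =>
    let st := (pvDY.zip pvDX).foldl (fun (st : List (Int × Int) × List (Int × Int) × (Int × Int → Int)) (d : Int × Int) =>
      let ny := y + d.1
      let nx := x + d.2
      if 0 ≤ ny ∧ ny < n ∧ 0 ≤ nx ∧ nx < m ∧ (ny, nx) ∉ st.2.1 ∧ pvCellAt land ny nx = 1 then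
        (st.1 ++ [(ny, nx)], (ny, nx) :: st.2.1, fun c => if c = (ny, nx) then lbl else st.2.2 c)
      else st) (rest, vis, lm)
    bfsA land n m lbl st.1 st.2.1 st.2.2 (vol + 1)
termination_by 2 * pvUnvis n m vis + queue.length
decreasing_by
  have hs := pvScanA_spec land n m lbl y x (pvDY.zip pvDX) rest vis lm
    (by rw [pvMapZip]; exact pvNbrs_nodup _)
  have hmap := pvMapZip y x
  set L := pvNewOf land n m vis ((pvDY.zip pvDX).map (fun d => (y + d.1, x + d.2)))
  have hf := pvNewOf_facts land n m vis ((pvDY.zip pvDX).map (fun d => (y + d.1, x + d.2)))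
    (by rw [hmap]; exact pvNbrs_nodup _)
  have hle := pvUnvis_append_le n m L vis hf.1 (fun b hb => by
    have := hf.2 b hb
    exact ⟨(mem_pvGridL n m b).mpr ⟨this.1.1, this.1.2.1, this.1.2.2.1, this.1.2.2.2.1⟩, this.2.1⟩)
  simp only [dite_eq_ite]
  rw [hs.1, hs.2.1]
  simp only [List.length_append, List.length_cons]
  omega

-- ===== PORT B =====
-- B's per-column BFS: pops a cell, counts it, pushes unvisited in-bounds oil neighbours
def bfsB (land : List (List Int)) (n m : Int)
    (queue vis : List (Int × Int)) (cnt : Int) : List (Int × Int) × Int :=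
  match queue with
  | [] => (vis, cnt)
  | (y, x) :: rest =>
    let st := [(y - 1, x), (y + 1, x), (y, x - 1), (y, x + 1)].foldl (fun (st : List (Int × Int) × List (Int × Int)) (d : Int × Int) =>
      if 0 ≤ d.1 ∧ d.1 < n ∧ 0 ≤ d.2 ∧ d.2 < m ∧ d ∉ st.2 ∧ pvCellAt land d.1 d.2 = 1 then
        (st.1 ++ [d], d :: st.2)
      else st) (rest, vis)
    bfsB land n m st.1 st.2 (cnt + 1)
termination_by 2 * pvUnvis n m vis + queue.length
decreasing_by
  have hs := pvScanB_spec land n m [(y - 1, x), (y + 1, x), (y, x - 1), (y, x + 1)] rest vis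
    (pvNbrs_nodup (y, x))
  set L := pvNewOf land n m vis [(y - 1, x), (y + 1, x), (y, x - 1), (y, x + 1)]
  have hf := pvNewOf_facts land n m vis [(y - 1, x), (y + 1, x), (y, x - 1), (y, x + 1)]
    (pvNbrs_nodup (y, x))
  have hle := pvUnvis_append_le n m L vis hf.1 (fun b hb => by
    have := hf.2 b hb
    exact ⟨(mem_pvGridL n m b).mpr ⟨this.1.1, this.1.2.1, this.1.2.2.1, this.1.2.2.2.1⟩, this.2.1⟩)
  simp only [dite_eq_ite]
  rw [hs.1, hs.2]
  simp only [List.length_append, List.length_cons]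
  omega

-- A: label every component by BFS, record its volume, then per column sum the
-- volumes of the distinct labels seen in that column, taking the maximum.
def solution (land : List (List Int)) : Int :=
  let n : Int := (land.length : Int)
  let m : Int := (land.headI.length : Int)
  let st := (List.range land.length).foldl (fun st (i : Nat) =>
      (List.range land.headI.length).foldl (fun st (j : Nat) =>
        if ((i : Int), (j : Int)) ∉ st.1 ∧ pvCellAt land (i : Int) (j : Int) = 1 then
          let r := bfsA land n m st.2.2.2 [((i : Int), (j : Int))] (((i : Int), (j : Int)) :: st.1)
            (fun b => if b = ((i : Int), (j : Int)) then st.2.2.2 else st.2.1 b) 0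
          (r.1, r.2.1, st.2.2.1.insert st.2.2.2 r.2.2, st.2.2.2 + 1)
        else st) st)
    (([] : List (Int × Int)), (fun _ => (-1 : Int)), (PySem.Dict.empty : PySem.Dict Int Int), (0 : Int))
  (List.range land.headI.length).foldl (fun total (j : Nat) =>
    let column := (List.range land.length).foldl (fun col (i : Nat) =>
        if st.2.1 ((i : Int), (j : Int)) ≠ -1 then PySem.Set.add col (st.2.1 ((i : Int), (j : Int)))
        else col)
      (PySem.Set.empty : PySem.Set Int)
    let colv := if column ≠ [] then column.foldl (fun s v => s + st.2.2.1.getD v 0) 0 else 0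
    max total colv) 0

-- B: for each column, one multi-source BFS from the column's oil cells; count cells.
def solution_alt (land : List (List Int)) : Int :=
  let n : Int := (land.length : Int)
  let m : Int := (land.headI.length : Int)
  (List.range land.headI.length).foldl (fun best (j : Nat) =>
    let seeds := (List.range land.length).filterMap (fun (i : Nat) =>
      if pvCellAt land (i : Int) (j : Int) = 1 then some ((i : Int), (j : Int)) else none)
    max best (bfsB land n m seeds seeds 0).2) 0

-- ===== PRECONDITION & SPEC =====
-- Pre_ excludes exactly the inputs where the Python A raises IndexError: the empty
-- grid (land[0]) and ragged grids with a row shorter than the first row (land[i][j]).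
def Pre_solution (land : List (List Int)) : Prop :=
  land ≠ [] ∧ ∀ row ∈ land, land.headI.length ≤ row.length
instance (land : List (List Int)) : Decidable (Pre_solution land) := by
  unfold Pre_solution; infer_instance

def pvWitness_solution : List (List Int) := [[1, 0, 1], [1, 1, 0]]

def Spec_solution (land : List (List Int)) (out : Int) : Prop := out = solution_alt land
instance (land : List (List Int)) (out : Int) : Decidable (Spec_solution land out) := by
  unfold Spec_solution; infer_instance

-- ===== CLAIM (what is proved, stated in full; the proofs are below) =====
def Claim_equal_solution : Prop :=
  ∀ (land : List (List Int)), Dom_solution land → Pre_solution land → Spec_solution land (solution land)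

-- ===== LEMMAS AND PROOFS =====

-- ----- reachability theory -----
def pvStepR (land : List (List Int)) (n m : Int) (a b : Int × Int) : Prop :=
  b ∈ pvNbrs a ∧ pvGood land n m b

def pvReach (land : List (List Int)) (n m : Int) (a b : Int × Int) : Prop :=
  Relation.ReflTransGen (pvStepR land n m) a b

lemma pvReach_good (land : List (List Int)) (n m : Int) (a b : Int × Int)
    (h : pvReach land n m a b) (ha : pvGood land n m a) : pvGood land n m b := by
  induction h with
  | refl => exact ha
  | tail _ h2 _ => exact h2.2

lemma pvNbrs_symm (a b : Int × Int) : a ∈ pvNbrs b ↔ b ∈ pvNbrs a := by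
  obtain ⟨a1, a2⟩ := a
  obtain ⟨b1, b2⟩ := b
  simp only [pvNbrs, List.mem_cons, List.not_mem_nil, or_false, Prod.mk.injEq]
  omega

lemma pvReach_symm (land : List (List Int)) (n m : Int) (a b : Int × Int)
    (ha : pvGood land n m a) (h : pvReach land n m a b) : pvReach land n m b a := by
  induction h with
  | refl => exact Relation.ReflTransGen.refl
  | @tail c d h1 h2 ih =>
    have hgc : pvGood land n m c := pvReach_good land n m a c h1 ha
    exact Relation.ReflTransGen.head ⟨(pvNbrs_symm c d).mpr h2.1, hgc⟩ ih

lemma pvReach_trans (land : List (List Int)) (n m : Int) (a b c : Int × Int)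
    (h1 : pvReach land n m a b) (h2 : pvReach land n m b c) : pvReach land n m a c :=
  Relation.ReflTransGen.trans h1 h2

lemma pvReach_closed (land : List (List Int)) (n m : Int) (S : List (Int × Int))
    (hcl : ∀ c ∈ S, ∀ b ∈ pvNbrs c, pvGood land n m b → b ∈ S)
    (s t : Int × Int) (hs : s ∈ S) (h : pvReach land n m s t) : t ∈ S := by
  induction h with
  | refl => exact hs
  | @tail c d h1 h2 ih => exact hcl c ih d h2.1 h2.2

lemma mem_pvNewOf (land : List (List Int)) (n m : Int) (v cells : List (Int × Int))
    (b : Int × Int) :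
    b ∈ pvNewOf land n m v cells ↔ b ∈ cells ∧ pvGood land n m b ∧ b ∉ v := by
  simp [pvNewOf, List.mem_filter]

-- ----- exact characterisation of A's BFS loop -----
lemma bfsA_spec (land : List (List Int)) (n m lbl : Int) :
    ∀ (queue vis : List (Int × Int)) (lm : Int × Int → Int) (vol : Int),
      (∀ c ∈ queue, c ∈ vis) → queue.Nodup → vis.Nodup →
      (∀ c ∈ vis, pvGood land n m c) →
      (∀ c ∈ vis, c ∈ queue ∨ ∀ b ∈ pvNbrs c, pvGood land n m b → b ∈ vis) →
      (∀ c ∈ vis, c ∈ (bfsA land n m lbl queue vis lm vol).1) ∧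
      (∀ c ∈ (bfsA land n m lbl queue vis lm vol).1, pvGood land n m c) ∧
      (bfsA land n m lbl queue vis lm vol).1.Nodup ∧
      (∀ c ∈ (bfsA land n m lbl queue vis lm vol).1,
        c ∈ vis ∨ ∃ s ∈ queue, pvReach land n m s c) ∧
      (∀ c ∈ (bfsA land n m lbl queue vis lm vol).1, ∀ b ∈ pvNbrs c,
        pvGood land n m b → b ∈ (bfsA land n m lbl queue vis lm vol).1) ∧
      (∀ c, (bfsA land n m lbl queue vis lm vol).2.1 c =
        if c ∈ (bfsA land n m lbl queue vis lm vol).1 ∧ c ∉ vis then lbl else lm c) ∧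
      ((bfsA land n m lbl queue vis lm vol).2.2 + (vis.length : Int) =
        vol + (queue.length : Int) + ((bfsA land n m lbl queue vis lm vol).1.length : Int)) := by
  intro queue vis lm vol
  induction queue, vis, lm, vol using bfsA.induct land n m lbl with
  | case1 vis lm vol =>
    intro hqv hqnd hvnd hg hcl
    rw [bfsA.eq_def]
    refine ⟨fun c hc => hc, fun c hc => hg c hc, hvnd, fun c hc => Or.inl hc,
      ?_, ?_, by simp⟩
    · intro c hc b hb hgb
      rcases hcl c hc with h | h
      · exact absurd h (List.not_mem_nil)
      · exact h b hb hgb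
    · intro c
      simp
  | case2 vis lm vol y x rest stdef IH =>
    intro hqv hqnd hvnd hg hcl
    have hnd4 : ((pvDY.zip pvDX).map (fun d => (y + d.1, x + d.2))).Nodup := by
      rw [pvMapZip]; exact pvNbrs_nodup _
    have hs := pvScanA_spec land n m lbl y x (pvDY.zip pvDX) rest vis lm hnd4
    set L := pvNewOf land n m vis ((pvDY.zip pvDX).map (fun d => (y + d.1, x + d.2))) with hLdef
    have hmemL : ∀ b, b ∈ L ↔ b ∈ pvNbrs (y, x) ∧ pvGood land n m b ∧ b ∉ vis := by
      intro b
      rw [hLdef, mem_pvNewOf, pvMapZip]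
    have hLnd : L.Nodup := hnd4.filter _
    have hfun : ((pvDY.zip pvDX).foldl (fun (st : List (Int × Int) × List (Int × Int) × (Int × Int → Int)) (d : Int × Int) =>
        if 0 ≤ y + d.1 ∧ y + d.1 < n ∧ 0 ≤ x + d.2 ∧ x + d.2 < m ∧ (y + d.1, x + d.2) ∉ st.2.1 ∧ pvCellAt land (y + d.1) (x + d.2) = 1 then
          (st.1 ++ [(y + d.1, x + d.2)], (y + d.1, x + d.2) :: st.2.1, fun c => if c = (y + d.1, x + d.2) then lbl else st.2.2 c)
        else st) (rest, vis, lm)).2.2 = fun c => if c ∈ L then lbl else lm c := funext hs.2.2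
    have heq : bfsA land n m lbl ((y, x) :: rest) vis lm vol
        = bfsA land n m lbl (rest ++ L) (L.reverse ++ vis) (fun c => if c ∈ L then lbl else lm c) (vol + 1) := by
      conv_lhs => rw [bfsA.eq_def]; simp only []
      rw [hs.1, hs.2.1, hfun]
    have hstdef : stdef = ((pvDY.zip pvDX).foldl (fun (st : List (Int × Int) × List (Int × Int) × (Int × Int → Int)) (d : Int × Int) =>
        if 0 ≤ y + d.1 ∧ y + d.1 < n ∧ 0 ≤ x + d.2 ∧ x + d.2 < m ∧ (y + d.1, x + d.2) ∉ st.2.1 ∧ pvCellAt land (y + d.1) (x + d.2) = 1 then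
          (st.1 ++ [(y + d.1, x + d.2)], (y + d.1, x + d.2) :: st.2.1, fun c => if c = (y + d.1, x + d.2) then lbl else st.2.2 c)
        else st) (rest, vis, lm)) := rfl
    rw [hstdef, hs.1, hs.2.1, hfun] at IH
    rw [heq] at *
    have hLv : ∀ b ∈ L, b ∉ vis := fun b hb => ((hmemL b).mp hb).2.2
    have hrest : ∀ c ∈ rest, c ∈ vis := fun c hc => hqv c (by simp [hc])
    -- hypotheses for the IH
    have hqv' : ∀ c ∈ rest ++ L, c ∈ L.reverse ++ vis := by
      intro c hc
      rcases List.mem_append.mp hc with h | h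
      · exact List.mem_append.mpr (Or.inr (hrest c h))
      · exact List.mem_append.mpr (Or.inl (by simpa using h))
    have hqnd' : (rest ++ L).Nodup := by
      refine List.Nodup.append hqnd.of_cons hLnd ?_
      intro c hc1 hc2
      exact hLv c hc2 (hrest c hc1)
    have hvnd' : (L.reverse ++ vis).Nodup := by
      refine List.Nodup.append (List.nodup_reverse.mpr hLnd) hvnd ?_
      intro c hc1 hc2
      exact hLv c (by simpa using hc1) hc2
    have hg' : ∀ c ∈ L.reverse ++ vis, pvGood land n m c := by
      intro c hc
      rcases List.mem_append.mp hc with h | h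
      · exact ((hmemL c).mp (by simpa using h)).2.1
      · exact hg c h
    have hcl' : ∀ c ∈ L.reverse ++ vis, c ∈ rest ++ L ∨
        ∀ b ∈ pvNbrs c, pvGood land n m b → b ∈ L.reverse ++ vis := by
      intro c hc
      rcases List.mem_append.mp hc with h | h
      · exact Or.inl (List.mem_append.mpr (Or.inr (by simpa using h)))
      · rcases hcl c h with h2 | h2
        · rcases List.mem_cons.mp h2 with h3 | h3
          · subst h3
            refine Or.inr ?_
            intro b hb hgb
            by_cases hbv : b ∈ vis
            · exact List.mem_append.mpr (Or.inr hbv)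
            · exact List.mem_append.mpr (Or.inl (by
                simp only [List.mem_reverse]
                exact (hmemL b).mpr ⟨hb, hgb, hbv⟩))
          · exact Or.inl (List.mem_append.mpr (Or.inl h3))
        · exact Or.inr (fun b hb hgb => List.mem_append.mpr (Or.inr (h2 b hb hgb)))
    obtain ⟨c1, c2, c3, c4, c5, c6, c7⟩ := IH hqv' hqnd' hvnd' hg' hcl'
    refine ⟨?_, c2, c3, ?_, c5, ?_, ?_⟩
    · intro c hc
      exact c1 c (List.mem_append.mpr (Or.inr hc))
    · -- provenance
      intro c hc
      rcases c4 c hc with h | h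
      · rcases List.mem_append.mp h with h2 | h2
        · refine Or.inr ⟨(y, x), by simp, ?_⟩
          have hm := (hmemL c).mp (by simpa using h2)
          exact Relation.ReflTransGen.single ⟨hm.1, hm.2.1⟩
        · exact Or.inl h2
      · obtain ⟨s, hs1, hs2⟩ := h
        rcases List.mem_append.mp hs1 with h2 | h2
        · exact Or.inr ⟨s, by simp [h2], hs2⟩
        · have hm := (hmemL s).mp h2
          refine Or.inr ⟨(y, x), by simp, ?_⟩
          exact Relation.ReflTransGen.trans (Relation.ReflTransGen.single ⟨hm.1, hm.2.1⟩) hs2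
    · -- label map
      intro c
      rw [c6 c]
      by_cases h1 : c ∈ (bfsA land n m lbl (rest ++ L) (L.reverse ++ vis) (fun c => if c ∈ L then lbl else lm c) (vol + 1)).1
      · by_cases h2 : c ∈ vis
        · have hA : c ∈ L.reverse ++ vis := List.mem_append.mpr (Or.inr h2)
          have hcL : c ∉ L := fun hcL => hLv c hcL h2
          simp [h1, h2, hA, hcL]
        · by_cases h3 : c ∈ L
          · have hA : c ∈ L.reverse ++ vis := List.mem_append.mpr (Or.inl (by simpa using h3))
            simp [h1, h2, h3, hA]
          · have hA : c ∉ L.reverse ++ vis := by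
              intro hc
              rcases List.mem_append.mp hc with h4 | h4
              · exact h3 (by simpa using h4)
              · exact h2 h4
            simp [h1, h2, hA]
      · have hnv : c ∉ L.reverse ++ vis := fun hc => h1 (c1 c hc)
        have h2 : c ∉ vis := fun h => hnv (List.mem_append.mpr (Or.inr h))
        have hcL : c ∉ L := fun h => hnv (List.mem_append.mpr (Or.inl (by simpa using h)))
        simp [h1, h2, hcL]
    · -- volume conservation
      have := c7
      simp only [List.length_append, List.length_reverse, List.length_cons] at *
      push_cast at *
      omega


-- B's loop is A's loop without the label map
lemma bfsB_eq (land : List (List Int)) (n m lbl : Int) :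
    ∀ (queue vis : List (Int × Int)) (cnt : Int) (lm : Int × Int → Int),
      bfsB land n m queue vis cnt
        = ((bfsA land n m lbl queue vis lm cnt).1, (bfsA land n m lbl queue vis lm cnt).2.2) := by
  intro queue vis cnt
  induction queue, vis, cnt using bfsB.induct land n m with
  | case1 vis cnt =>
    intro lm
    rw [bfsB.eq_def, bfsA.eq_def]
  | case2 vis cnt y x rest stdef IH =>
    intro lm
    have hndB : [(y - 1, x), (y + 1, x), (y, x - 1), (y, x + 1)].Nodup := pvNbrs_nodup (y, x)
    have hsB := pvScanB_spec land n m [(y - 1, x), (y + 1, x), (y, x - 1), (y, x + 1)] rest vis hndB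
    have hndA : ((pvDY.zip pvDX).map (fun d => (y + d.1, x + d.2))).Nodup := by
      rw [pvMapZip]; exact pvNbrs_nodup _
    have hsA := pvScanA_spec land n m lbl y x (pvDY.zip pvDX) rest vis lm hndA
    have hLeq : pvNewOf land n m vis ((pvDY.zip pvDX).map (fun d => (y + d.1, x + d.2)))
        = pvNewOf land n m vis [(y - 1, x), (y + 1, x), (y, x - 1), (y, x + 1)] := by
      rw [pvMapZip]; rfl
    set L := pvNewOf land n m vis [(y - 1, x), (y + 1, x), (y, x - 1), (y, x + 1)] with hLdef
    rw [hLeq] at hsA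
    have hfunA : ((pvDY.zip pvDX).foldl (fun (st : List (Int × Int) × List (Int × Int) × (Int × Int → Int)) (d : Int × Int) =>
        if 0 ≤ y + d.1 ∧ y + d.1 < n ∧ 0 ≤ x + d.2 ∧ x + d.2 < m ∧ (y + d.1, x + d.2) ∉ st.2.1 ∧ pvCellAt land (y + d.1) (x + d.2) = 1 then
          (st.1 ++ [(y + d.1, x + d.2)], (y + d.1, x + d.2) :: st.2.1, fun c => if c = (y + d.1, x + d.2) then lbl else st.2.2 c)
        else st) (rest, vis, lm)).2.2 = fun c => if c ∈ L then lbl else lm c := funext hsA.2.2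
    have heqA : bfsA land n m lbl ((y, x) :: rest) vis lm cnt
        = bfsA land n m lbl (rest ++ L) (L.reverse ++ vis) (fun c => if c ∈ L then lbl else lm c) (cnt + 1) := by
      conv_lhs => rw [bfsA.eq_def]; simp only []
      rw [hsA.1, hsA.2.1, hfunA]
    have heqB : bfsB land n m ((y, x) :: rest) vis cnt
        = bfsB land n m (rest ++ L) (L.reverse ++ vis) (cnt + 1) := by
      conv_lhs => rw [bfsB.eq_def]; simp only []
      rw [hsB.1, hsB.2]
    have hstdef : stdef = ([(y - 1, x), (y + 1, x), (y, x - 1), (y, x + 1)].foldl (fun (st : List (Int × Int) × List (Int × Int)) (d : Int × Int) =>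
      if 0 ≤ d.1 ∧ d.1 < n ∧ 0 ≤ d.2 ∧ d.2 < m ∧ d ∉ st.2 ∧ pvCellAt land d.1 d.2 = 1 then
        (st.1 ++ [d], d :: st.2)
      else st) (rest, vis)) := rfl
    rw [hstdef, hsB.1, hsB.2] at IH
    rw [heqA, heqB]
    exact IH (fun c => if c ∈ L then lbl else lm c)

-- running A's BFS from a fresh seed on top of a closed visited set
lemma bfsA_run (land : List (List Int)) (n m lbl : Int) (s : Int × Int)
    (vis : List (Int × Int)) (lm : Int × Int → Int)
    (hvnd : vis.Nodup) (hg : ∀ c ∈ vis, pvGood land n m c)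
    (hcl : ∀ c ∈ vis, ∀ b ∈ pvNbrs c, pvGood land n m b → b ∈ vis)
    (hsg : pvGood land n m s) (hsv : s ∉ vis) :
    (∀ c, c ∈ (bfsA land n m lbl [s] (s :: vis) (fun b => if b = s then lbl else lm b) 0).1 ↔
        c ∈ vis ∨ pvReach land n m s c) ∧
    (bfsA land n m lbl [s] (s :: vis) (fun b => if b = s then lbl else lm b) 0).1.Nodup ∧
    (∀ c ∈ (bfsA land n m lbl [s] (s :: vis) (fun b => if b = s then lbl else lm b) 0).1, pvGood land n m c) ∧
    (∀ c ∈ (bfsA land n m lbl [s] (s :: vis) (fun b => if b = s then lbl else lm b) 0).1, ∀ b ∈ pvNbrs c,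
      pvGood land n m b → b ∈ (bfsA land n m lbl [s] (s :: vis) (fun b => if b = s then lbl else lm b) 0).1) ∧
    (∀ c, (bfsA land n m lbl [s] (s :: vis) (fun b => if b = s then lbl else lm b) 0).2.1 c =
      if c ∈ (bfsA land n m lbl [s] (s :: vis) (fun b => if b = s then lbl else lm b) 0).1 ∧ c ∉ vis then lbl else
        if c = s then lbl else lm c) ∧
    ((bfsA land n m lbl [s] (s :: vis) (fun b => if b = s then lbl else lm b) 0).2.2 + (vis.length : Int) =
      ((bfsA land n m lbl [s] (s :: vis) (fun b => if b = s then lbl else lm b) 0).1.length : Int)) := by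
  have hbase := bfsA_spec land n m lbl [s] (s :: vis) (fun b => if b = s then lbl else lm b) 0
    (by intro c hc; simp at hc; simp [hc])
    (by simp)
    (by exact List.nodup_cons.mpr ⟨hsv, hvnd⟩)
    (by
      intro c hc
      rcases List.mem_cons.mp hc with h | h
      · exact h ▸ hsg
      · exact hg c h)
    (by
      intro c hc
      rcases List.mem_cons.mp hc with h | h
      · exact Or.inl (by simp [h])
      · exact Or.inr (fun b hb hgb => List.mem_cons.mpr (Or.inr (hcl c h b hb hgb))))
  obtain ⟨c1, c2, c3, c4, c5, c6, c7⟩ := hbase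
  have hmem : ∀ c, c ∈ (bfsA land n m lbl [s] (s :: vis) (fun b => if b = s then lbl else lm b) 0).1 ↔
      c ∈ vis ∨ pvReach land n m s c := by
    intro c
    constructor
    · intro hc
      rcases c4 c hc with h | h
      · rcases List.mem_cons.mp h with h2 | h2
        · exact Or.inr (h2 ▸ Relation.ReflTransGen.refl)
        · exact Or.inl h2
      · obtain ⟨t, ht1, ht2⟩ := h
        simp at ht1
        exact Or.inr (ht1 ▸ ht2)
    · intro hc
      rcases hc with h | h
      · exact c1 c (List.mem_cons.mpr (Or.inr h))
      · exact pvReach_closed land n m _ c5 s c (c1 s (by simp)) h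
  refine ⟨hmem, c3, c2, c5, ?_, ?_⟩
  · intro c
    rw [c6 c]
    by_cases h1 : c ∈ (bfsA land n m lbl [s] (s :: vis) (fun b => if b = s then lbl else lm b) 0).1
    · by_cases h2 : c ∈ vis
      · have : ¬ (c ∉ s :: vis) := fun h => h (List.mem_cons.mpr (Or.inr h2))
        have hcs : c ≠ s := fun h => hsv (h ▸ h2)
        simp [h1, h2, hcs]
      · by_cases h3 : c = s
        · subst h3
          simp [h1, h2]
        · have : c ∉ s :: vis ↔ True := by simp [h3, h2]
          simp [h1, h2, h3]
    · have h2 : c ∉ vis ∨ True := Or.inr trivial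
      have hns : c ≠ s := by
        intro h; subst h
        exact h1 (c1 c (by simp))
      have hnv : c ∉ vis := by
        intro h
        exact h1 (c1 c (List.mem_cons.mpr (Or.inr h)))
      simp [h1, hns, hnv]
  · have h7 := c7
    simp only [List.length_cons, List.length_nil] at h7 ⊢
    push_cast at h7 ⊢
    omega

-- ----- classes and counting -----
def pvClassS (land : List (List Int)) (n m : Int) (r : Int × Int) : Set (Int × Int) :=
  {c | pvReach land n m r c}

lemma pvClassS_finite (land : List (List Int)) (n m : Int) (r : Int × Int) :
    (pvClassS land n m r).Finite := by
  apply Set.Finite.subset (Set.Finite.insert r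
    (Finset.finite_toSet (Finset.Icc (0 : Int) (n - 1) ×ˢ Finset.Icc (0 : Int) (m - 1))))
  intro c hc
  rcases Relation.ReflTransGen.cases_tail hc with h | ⟨b, _, h2⟩
  · exact Or.inl h
  · right
    obtain ⟨g1, g2, g3, g4, _⟩ := h2.2
    simp only [Finset.coe_product, Set.mem_prod, Finset.mem_coe, Finset.mem_Icc]
    constructor <;> constructor <;> omega

lemma pvList_ncard (l : List (Int × Int)) (h : l.Nodup) :
    Set.ncard {c | c ∈ l} = l.length := by
  rw [show {c | c ∈ l} = (l.toFinset : Set (Int × Int)) by ext c; simp]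
  rw [Set.ncard_coe_finset, List.toFinset_card_of_nodup h]

-- ----- the outer labelling loop invariant -----
def pvInv (land : List (List Int)) (n m : Int) (pre : List (Int × Int))
    (st : List (Int × Int) × (Int × Int → Int) × PySem.Dict Int Int × Int) : Prop :=
  ∃ reps : List (Int × Int),
    st.2.2.2 = (reps.length : Int) ∧
    (∀ r ∈ reps, pvGood land n m r) ∧
    (∀ k l : Nat, ∀ hk : k < reps.length, ∀ hl : l < reps.length, k ≠ l →
      ¬ pvReach land n m (reps[k]'hk) (reps[l]'hl)) ∧
    (∀ c, c ∈ st.1 ↔ ∃ k : Nat, ∃ hk : k < reps.length, pvReach land n m (reps[k]'hk) c) ∧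
    (∀ k : Nat, ∀ hk : k < reps.length, ∀ c, pvReach land n m (reps[k]'hk) c →
      st.2.1 c = (k : Int)) ∧
    (∀ c, c ∉ st.1 → st.2.1 c = -1) ∧
    (∀ k : Nat, ∀ hk : k < reps.length,
      st.2.2.1.get? (k : Int) = some ((Set.ncard (pvClassS land n m (reps[k]'hk)) : Int))) ∧
    st.1.Nodup ∧
    (∀ c ∈ pre, pvGood land n m c → c ∈ st.1)

lemma pvInv_vis_good (land : List (List Int)) (n m : Int) (pre : List (Int × Int)) st
    (h : pvInv land n m pre st) : ∀ c ∈ st.1, pvGood land n m c := by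
  obtain ⟨reps, _, h2, _, h4, _⟩ := h
  intro c hc
  obtain ⟨k, hk, hr⟩ := (h4 c).mp hc
  exact pvReach_good land n m _ c hr (h2 _ (List.getElem_mem hk))

lemma pvInv_vis_closed (land : List (List Int)) (n m : Int) (pre : List (Int × Int)) st
    (h : pvInv land n m pre st) :
    ∀ c ∈ st.1, ∀ b ∈ pvNbrs c, pvGood land n m b → b ∈ st.1 := by
  obtain ⟨reps, _, _, _, h4, _⟩ := h
  intro c hc b hb hgb
  obtain ⟨k, hk, hr⟩ := (h4 c).mp hc
  exact (h4 b).mpr ⟨k, hk, Relation.ReflTransGen.tail hr ⟨hb, hgb⟩⟩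

-- one step of the labelling loop preserves the invariant
lemma pvInv_step (land : List (List Int)) (n m : Int) (pre : List (Int × Int))
    (st : List (Int × Int) × (Int × Int → Int) × PySem.Dict Int Int × Int)
    (y x : Int) (hb : 0 ≤ y ∧ y < n ∧ 0 ≤ x ∧ x < m)
    (h : pvInv land n m pre st) :
    pvInv land n m (pre ++ [(y, x)])
      (if (y, x) ∉ st.1 ∧ pvCellAt land y x = 1 then
        ((bfsA land n m st.2.2.2 [(y, x)] ((y, x) :: st.1)
            (fun b => if b = (y, x) then st.2.2.2 else st.2.1 b) 0).1,
         (bfsA land n m st.2.2.2 [(y, x)] ((y, x) :: st.1)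
            (fun b => if b = (y, x) then st.2.2.2 else st.2.1 b) 0).2.1,
         st.2.2.1.insert st.2.2.2 (bfsA land n m st.2.2.2 [(y, x)] ((y, x) :: st.1)
            (fun b => if b = (y, x) then st.2.2.2 else st.2.1 b) 0).2.2,
         st.2.2.2 + 1)
      else st) := by
  by_cases hcond : (y, x) ∉ st.1 ∧ pvCellAt land y x = 1
  case neg =>
    rw [if_neg hcond]
    obtain ⟨reps, i1, i2, i3, i4, i5, i6, i7, i8, i9⟩ := h
    refine ⟨reps, i1, i2, i3, i4, i5, i6, i7, i8, ?_⟩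
    intro c hc hgc
    rcases List.mem_append.mp hc with hc | hc
    · exact i9 c hc hgc
    · have hceq : c = (y, x) := by simpa using hc
      subst hceq
      by_cases hin : (y, x) ∈ st.1
      · exact hin
      · exact absurd ⟨hin, hgc.2.2.2.2⟩ hcond
  case pos =>
    rw [if_pos hcond]
    obtain ⟨hsv, hcell⟩ := hcond
    have hsg : pvGood land n m (y, x) := ⟨hb.1, hb.2.1, hb.2.2.1, hb.2.2.2, hcell⟩
    have hvg := pvInv_vis_good land n m pre st h
    have hvcl := pvInv_vis_closed land n m pre st h
    obtain ⟨reps, i1, i2, i3, i4, i5, i6, i7, i8, i9⟩ := h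
    have hr := bfsA_run land n m st.2.2.2 (y, x) st.1 st.2.1 i8 hvg hvcl hsg hsv
    obtain ⟨r1, r2, r3, r4, r5, r6⟩ := hr
    have hdisj : ∀ c, pvReach land n m (y, x) c → c ∉ st.1 := by
      intro c hrc hcv
      obtain ⟨k, hk, hkc⟩ := (i4 c).mp hcv
      have h1 : pvReach land n m c (y, x) := pvReach_symm land n m (y, x) c hsg hrc
      have h2 : pvReach land n m (reps[k]'hk) (y, x) := pvReach_trans land n m _ c _ hkc h1
      exact hsv ((i4 (y, x)).mpr ⟨k, hk, h2⟩)
    have hsub : ∀ c ∈ st.1, c ∈ (bfsA land n m st.2.2.2 [(y, x)] ((y, x) :: st.1)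
        (fun b => if b = (y, x) then st.2.2.2 else st.2.1 b) 0).1 :=
      fun c hc => (r1 c).mpr (Or.inl hc)
    have hself : (y, x) ∈ (bfsA land n m st.2.2.2 [(y, x)] ((y, x) :: st.1)
        (fun b => if b = (y, x) then st.2.2.2 else st.2.1 b) 0).1 :=
      (r1 (y, x)).mpr (Or.inr Relation.ReflTransGen.refl)
    have hrepmem : ∀ k : Nat, ∀ hk : k < reps.length, (reps[k]'hk) ∈ st.1 :=
      fun k hk => (i4 _).mpr ⟨k, hk, Relation.ReflTransGen.refl⟩
    refine ⟨reps ++ [(y, x)], ?_, ?_, ?_, ?_, ?_, ?_, ?_, r2, ?_⟩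
    · simp only [List.length_append, List.length_cons, List.length_nil]
      push_cast
      omega
    · intro t ht
      rcases List.mem_append.mp ht with h2 | h2
      · exact i2 t h2
      · have : t = (y, x) := by simpa using h2
        exact this ▸ hsg
    · intro k l hk hl hkl
      simp only [List.length_append, List.length_cons, List.length_nil] at hk hl
      by_cases hk' : k < reps.length
      · by_cases hl' : l < reps.length
        · rw [List.getElem_append_left hk', List.getElem_append_left hl']
          exact i3 k l hk' hl' hkl
        · have hleq : l = reps.length := by omega
          subst hleq
          rw [List.getElem_append_left hk', List.getElem_concat_length rfl]
          intro hre
          exact hsv ((i4 (y, x)).mpr ⟨k, hk', hre⟩)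
      · have hkeq : k = reps.length := by omega
        subst hkeq
        have hl' : l < reps.length := by omega
        rw [List.getElem_concat_length rfl, List.getElem_append_left hl']
        intro hre
        exact hdisj _ hre (hrepmem l hl')
    · intro c
      rw [r1 c]
      constructor
      · intro hc
        rcases hc with h2 | h2
        · obtain ⟨k, hk, hkc⟩ := (i4 c).mp h2
          refine ⟨k, by simp; omega, ?_⟩
          rwa [List.getElem_append_left hk]
        · refine ⟨reps.length, by simp, ?_⟩
          rwa [List.getElem_concat_length rfl]
      · rintro ⟨k, hk, hkc⟩
        simp only [List.length_append, List.length_cons, List.length_nil] at hk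
        by_cases hk' : k < reps.length
        · rw [List.getElem_append_left hk'] at hkc
          exact Or.inl ((i4 c).mpr ⟨k, hk', hkc⟩)
        · have hkeq : k = reps.length := by omega
          subst hkeq
          rw [List.getElem_concat_length rfl] at hkc
          exact Or.inr hkc
    · intro k hk c hkc
      simp only [List.length_append, List.length_cons, List.length_nil] at hk
      rw [r5 c]
      by_cases hk' : k < reps.length
      · rw [List.getElem_append_left hk'] at hkc
        have hcv : c ∈ st.1 := (i4 c).mpr ⟨k, hk', hkc⟩
        have hc1 : ¬ (c ∈ (bfsA land n m st.2.2.2 [(y, x)] ((y, x) :: st.1)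
            (fun b => if b = (y, x) then st.2.2.2 else st.2.1 b) 0).1 ∧ c ∉ st.1) := by
          intro hcon; exact hcon.2 hcv
        rw [if_neg hc1]
        have hcs : c ≠ (y, x) := fun hh => hsv (hh ▸ hcv)
        rw [if_neg hcs]
        exact i5 k hk' c hkc
      · have hkeq : k = reps.length := by omega
        subst hkeq
        rw [List.getElem_concat_length rfl] at hkc
        have hcr : c ∈ (bfsA land n m st.2.2.2 [(y, x)] ((y, x) :: st.1)
            (fun b => if b = (y, x) then st.2.2.2 else st.2.1 b) 0).1 := (r1 c).mpr (Or.inr hkc)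
        rw [if_pos ⟨hcr, hdisj c hkc⟩, i1]
    · intro c hc
      have hcv : c ∉ st.1 := fun hh => hc (hsub c hh)
      rw [r5 c, if_neg (fun hcon => hc hcon.1), if_neg (fun hh => hc (by rw [hh]; exact hself))]
      exact i6 c hcv
    · intro k hk
      simp only [List.length_append, List.length_cons, List.length_nil] at hk
      by_cases hk' : k < reps.length
      · have hne : (k : Int) ≠ st.2.2.2 := by
          rw [i1]
          intro hh
          have : k = reps.length := by exact_mod_cast hh
          omega
        rw [PySem.Dict.get?_insert_of_ne _ _ hne, List.getElem_append_left hk']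
        exact i7 k hk'
      · have hkeq : k = reps.length := by omega
        subst hkeq
        rw [List.getElem_concat_length rfl, ← i1, PySem.Dict.get?_insert_self]
        congr 1
        have hseteq : {c | c ∈ (bfsA land n m st.2.2.2 [(y, x)] ((y, x) :: st.1)
            (fun b => if b = (y, x) then st.2.2.2 else st.2.1 b) 0).1}
            = {c | c ∈ st.1} ∪ pvClassS land n m (y, x) := by
          ext c
          simp only [Set.mem_setOf_eq, Set.mem_union, pvClassS]
          exact r1 c
        have hdisj2 : Disjoint {c | c ∈ st.1} (pvClassS land n m (y, x)) := by
          rw [Set.disjoint_right]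
          intro c hc
          exact hdisj c hc
        have hcard := congrArg Set.ncard hseteq
        rw [Set.ncard_union_eq hdisj2 (Set.Finite.subset
            (List.finite_toSet st.1) (fun c hc => hc)) (pvClassS_finite land n m (y, x))] at hcard
        rw [pvList_ncard _ r2, pvList_ncard _ i8] at hcard
        have hvol := r6
        omega
    · intro c hc hgc
      rcases List.mem_append.mp hc with h2 | h2
      · exact hsub c (i9 c h2 hgc)
      · have : c = (y, x) := by simpa using h2
        exact this ▸ hself

-- fold-with-invariant helper
lemma pvFoldl_inv {σ : Type} (P : List (Int × Int) → σ → Prop) (f : σ → (Int × Int) → σ) :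
    ∀ (l pre : List (Int × Int)) (st : σ),
      (∀ pre' st' c, c ∈ l → P pre' st' → P (pre' ++ [c]) (f st' c)) →
      P pre st → P (pre ++ l) (l.foldl f st) := by
  intro l
  induction l with
  | nil => intro pre st _ h; simpa using h
  | cons c l ih =>
    intro pre st hstep h
    have h1 := hstep pre st c (by simp) h
    have h2 := ih (pre ++ [c]) (f st c) (fun p s a ha => hstep p s a (by simp [ha])) h1
    simpa [List.append_assoc] using h2

-- the nested row/column loops are a fold over the grid cell list
lemma pvFoldl_grid {σ : Type} (N M : Nat) (g : σ → Int → Int → σ) (init : σ) :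
    (List.range N).foldl (fun st (i : Nat) =>
      (List.range M).foldl (fun st (j : Nat) => g st (i : Int) (j : Int)) st) init
      = (pvGridL (N : Int) (M : Int)).foldl (fun st c => g st c.1 c.2) init := by
  unfold pvGridL
  rw [Int.toNat_natCast, Int.toNat_natCast, List.foldl_flatMap]
  apply PySem.List.foldl_congr_mem
  intro acc i _
  rw [List.foldl_map]

lemma pvInv_init (land : List (List Int)) (n m : Int) :
    pvInv land n m []
      (([] : List (Int × Int)), (fun _ => (-1 : Int)), (PySem.Dict.empty : PySem.Dict Int Int), (0 : Int)) := by
  refine ⟨[], by simp, by simp, ?_, ?_, ?_, fun c _ => rfl, ?_, List.nodup_nil, by simp⟩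
  · intro k l hk; simp at hk
  · intro c
    simp only [List.not_mem_nil, false_iff]
    rintro ⟨k, hk, -⟩
    simp at hk
  · intro k hk; simp at hk
  · intro k hk; simp at hk

-- union of the classes whose label occurs in ks
def pvUnionS (land : List (List Int)) (n m : Int) (reps : List (Int × Int))
    (ks : List Int) : Set (Int × Int) :=
  {c | ∃ kn : Nat, ∃ hk : kn < reps.length, (kn : Int) ∈ ks ∧ pvReach land n m (reps[kn]'hk) c}

lemma pvUnionS_finite (land : List (List Int)) (n m : Int) (reps : List (Int × Int)) :
    ∀ ks, (pvUnionS land n m reps ks).Finite := by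
  intro ks
  apply Set.Finite.subset (Set.Finite.biUnion (Set.finite_range (fun k : Fin reps.length => k))
    (fun k _ => pvClassS_finite land n m (reps[(k : Nat)]'k.2)))
  rintro c ⟨kn, hk, -, hr⟩
  have hmem : c ∈ pvClassS land n m (reps[((⟨kn, hk⟩ : Fin reps.length) : Nat)]'(⟨kn, hk⟩ : Fin reps.length).2) := hr
  exact Set.mem_biUnion (Set.mem_range_self (⟨kn, hk⟩ : Fin reps.length)) hmem

-- the label lists A builds per column sum to the size of the union of their classes
lemma pvSum_classes (land : List (List Int)) (n m : Int) (reps : List (Int × Int))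
    (lvol : PySem.Dict Int Int)
    (i2 : ∀ r ∈ reps, pvGood land n m r)
    (i3 : ∀ k l : Nat, ∀ hk : k < reps.length, ∀ hl : l < reps.length, k ≠ l →
      ¬ pvReach land n m (reps[k]'hk) (reps[l]'hl))
    (i7 : ∀ k : Nat, ∀ hk : k < reps.length,
      lvol.get? (k : Int) = some ((Set.ncard (pvClassS land n m (reps[k]'hk)) : Int))) :
    ∀ ks : List Int, ks.Nodup →
      (∀ k ∈ ks, ∃ kn : Nat, ∃ _ : kn < reps.length, k = (kn : Int)) →
      ks.foldl (fun s v => s + lvol.getD v 0) 0 = (Set.ncard (pvUnionS land n m reps ks) : Int) := by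
  intro ks
  induction ks with
  | nil =>
    intro _ _
    have : pvUnionS land n m reps [] = ∅ := by
      ext c; simp [pvUnionS]
    simp [this]
  | cons k ks ih =>
    intro hnd hform
    obtain ⟨kn, hkn, rfl⟩ := hform k (by simp)
    rw [List.nodup_cons] at hnd
    have hsplit : pvUnionS land n m reps ((kn : Int) :: ks)
        = pvClassS land n m (reps[kn]'hkn) ∪ pvUnionS land n m reps ks := by
      ext c
      simp only [pvUnionS, pvClassS, Set.mem_union, Set.mem_setOf_eq, List.mem_cons]
      constructor
      · rintro ⟨kn', hk', hmem | hmem, hr⟩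
        · have : kn' = kn := by exact_mod_cast hmem
          subst this
          exact Or.inl hr
        · exact Or.inr ⟨kn', hk', hmem, hr⟩
      · rintro (hr | ⟨kn', hk', hmem, hr⟩)
        · exact ⟨kn, hkn, Or.inl rfl, hr⟩
        · exact ⟨kn', hk', Or.inr hmem, hr⟩
    have hdisj : Disjoint (pvClassS land n m (reps[kn]'hkn)) (pvUnionS land n m reps ks) := by
      rw [Set.disjoint_left]
      rintro c hc ⟨kn', hk', hmem, hr⟩
      have hne : kn' ≠ kn := by
        intro hh
        subst hh
        exact hnd.1 hmem
      have hgood' : pvGood land n m (reps[kn']'hk') := i2 _ (List.getElem_mem hk')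
      have h1 : pvReach land n m c (reps[kn']'hk') := pvReach_symm land n m _ c hgood' hr
      exact i3 kn kn' hkn hk' (fun hh => hne hh.symm) (pvReach_trans land n m _ c _ hc h1)
    have hlen : (pvUnionS land n m reps ((kn : Int) :: ks)).ncard
        = (pvClassS land n m (reps[kn]'hkn)).ncard + (pvUnionS land n m reps ks).ncard := by
      rw [hsplit, Set.ncard_union_eq hdisj (pvClassS_finite land n m _) (pvUnionS_finite land n m reps ks)]
    have hget : lvol.getD (kn : Int) 0 = ((pvClassS land n m (reps[kn]'hkn)).ncard : Int) := by
      rw [PySem.Dict.getD_eq_get?_getD, i7 kn hkn]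
      rfl
    have hrec := ih hnd.2 (fun a ha => hform a (by simp [ha]))
    rw [PySem.List.foldl_add] at hrec ⊢
    simp only [List.map_cons, List.sum_cons] at *
    rw [hlen]
    push_cast
    rw [hget] at *
    omega

lemma pvCol_spec (lm : (Int × Int) → Int) (j : Nat) :
    ∀ (l : List Nat) (s0 : PySem.Set Int), s0.Nodup →
      (l.foldl (fun col (i : Nat) =>
        if lm ((i : Int), (j : Int)) ≠ -1 then PySem.Set.add col (lm ((i : Int), (j : Int)))
        else col) s0).Nodup ∧
      ∀ v, v ∈ (l.foldl (fun col (i : Nat) =>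
          if lm ((i : Int), (j : Int)) ≠ -1 then PySem.Set.add col (lm ((i : Int), (j : Int)))
          else col) s0) ↔
        v ∈ s0 ∨ ∃ i ∈ l, lm ((i : Int), (j : Int)) = v ∧ v ≠ -1 := by
  intro l
  induction l with
  | nil =>
    intro s0 h0
    simp only [List.foldl_nil]
    exact ⟨h0, fun v => by simp⟩
  | cons i l ih =>
    intro s0 h0
    simp only [List.foldl_cons]
    by_cases hc : lm ((i : Int), (j : Int)) ≠ -1
    · rw [if_pos hc]
      obtain ⟨hnd, hmem⟩ := ih (PySem.Set.add s0 (lm ((i : Int), (j : Int))))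
        (PySem.Set.nodup_add _ _ h0)
      refine ⟨hnd, ?_⟩
      intro v
      rw [hmem v, PySem.Set.mem_add]
      constructor
      · rintro ((h | h) | ⟨i', hi', h⟩)
        · exact Or.inl h
        · exact Or.inr ⟨i, by simp, h ▸ rfl, h ▸ hc⟩
        · exact Or.inr ⟨i', by simp [hi'], h⟩
      · rintro (h | ⟨i', hi', h⟩)
        · exact Or.inl (Or.inl h)
        · rcases List.mem_cons.mp hi' with h2 | h2
          · subst h2
            exact Or.inl (Or.inr h.1.symm)
          · exact Or.inr ⟨i', h2, h⟩
    · rw [if_neg hc]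
      rw [not_not] at hc
      obtain ⟨hnd, hmem⟩ := ih s0 h0
      refine ⟨hnd, ?_⟩
      intro v
      rw [hmem v]
      constructor
      · rintro (h | ⟨i', hi', h⟩)
        · exact Or.inl h
        · exact Or.inr ⟨i', by simp [hi'], h⟩
      · rintro (h | ⟨i', hi', h⟩)
        · exact Or.inl h
        · rcases List.mem_cons.mp hi' with h2 | h2
          · subst h2
            exact absurd (h.1 ▸ hc) h.2
          · exact Or.inr ⟨i', h2, h⟩

lemma pvSeeds_spec (land : List (List Int)) (N : Nat) (j : Nat) :
    ((List.range N).filterMap (fun (i : Nat) =>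
      if pvCellAt land (i : Int) (j : Int) = 1 then some ((i : Int), (j : Int)) else none)).Nodup ∧
    ∀ c, c ∈ (List.range N).filterMap (fun (i : Nat) =>
        if pvCellAt land (i : Int) (j : Int) = 1 then some ((i : Int), (j : Int)) else none) ↔
      ∃ i : Nat, i < N ∧ c = ((i : Int), (j : Int)) ∧ pvCellAt land (i : Int) (j : Int) = 1 := by
  constructor
  · apply List.Nodup.filterMap ?_ (List.nodup_range)
    intro a a' b hb hb'
    simp only [Option.mem_def] at hb hb'
    by_cases h1 : pvCellAt land (a : Int) (j : Int) = 1
    · rw [if_pos h1] at hb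
      by_cases h2 : pvCellAt land (a' : Int) (j : Int) = 1
      · rw [if_pos h2] at hb'
        have := hb.trans hb'.symm
        have h3 : (a : Int) = (a' : Int) := by
          simpa using congrArg Prod.fst (Option.some.inj this)
        exact_mod_cast h3
      · rw [if_neg h2] at hb'; cases hb'
    · rw [if_neg h1] at hb; cases hb
  · intro c
    simp only [List.mem_filterMap, List.mem_range]
    constructor
    · rintro ⟨i, hi, hsome⟩
      by_cases h1 : pvCellAt land (i : Int) (j : Int) = 1
      · rw [if_pos h1] at hsome
        exact ⟨i, hi, (Option.some.inj hsome).symm, h1⟩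
      · rw [if_neg h1] at hsome; cases hsome
    · rintro ⟨i, hi, rfl, h1⟩
      exact ⟨i, hi, by rw [if_pos h1]⟩

-- the per-column value computed by A equals the per-column count computed by B
lemma pvColumn_eq (land : List (List Int)) (N M : Nat) (j : Nat) (hj : j < M)
    (reps vis : List (Int × Int)) (lm : (Int × Int) → Int) (lvol : PySem.Dict Int Int)
    (i2 : ∀ r ∈ reps, pvGood land (N : Int) (M : Int) r)
    (i3 : ∀ k l : Nat, ∀ hk : k < reps.length, ∀ hl : l < reps.length, k ≠ l →
      ¬ pvReach land (N : Int) (M : Int) (reps[k]'hk) (reps[l]'hl))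
    (i4 : ∀ c, c ∈ vis ↔ ∃ k : Nat, ∃ hk : k < reps.length,
      pvReach land (N : Int) (M : Int) (reps[k]'hk) c)
    (i5 : ∀ k : Nat, ∀ hk : k < reps.length, ∀ c,
      pvReach land (N : Int) (M : Int) (reps[k]'hk) c → lm c = (k : Int))
    (i6 : ∀ c, c ∉ vis → lm c = -1)
    (i7 : ∀ k : Nat, ∀ hk : k < reps.length,
      lvol.get? (k : Int) = some ((Set.ncard (pvClassS land (N : Int) (M : Int) (reps[k]'hk)) : Int)))
    (icov : ∀ c, pvGood land (N : Int) (M : Int) c → c ∈ vis) :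
    (if ((List.range N).foldl (fun col (i : Nat) =>
          if lm ((i : Int), (j : Int)) ≠ -1 then PySem.Set.add col (lm ((i : Int), (j : Int)))
          else col) (PySem.Set.empty : PySem.Set Int)) ≠ [] then
        ((List.range N).foldl (fun col (i : Nat) =>
          if lm ((i : Int), (j : Int)) ≠ -1 then PySem.Set.add col (lm ((i : Int), (j : Int)))
          else col) (PySem.Set.empty : PySem.Set Int)).foldl (fun s v => s + lvol.getD v 0) 0
      else 0)
      = (bfsB land (N : Int) (M : Int)
          ((List.range N).filterMap (fun (i : Nat) =>
            if pvCellAt land (i : Int) (j : Int) = 1 then some ((i : Int), (j : Int)) else none))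
          ((List.range N).filterMap (fun (i : Nat) =>
            if pvCellAt land (i : Int) (j : Int) = 1 then some ((i : Int), (j : Int)) else none))
          0).2 := by
  have hvg : ∀ c ∈ vis, pvGood land (N : Int) (M : Int) c := by
    intro c hc
    obtain ⟨k, hk, hr⟩ := (i4 c).mp hc
    exact pvReach_good land _ _ _ c hr (i2 _ (List.getElem_mem hk))
  obtain ⟨hcolnd, hcolmem⟩ := pvCol_spec lm j (List.range N) PySem.Set.empty List.nodup_nil
  set col := (List.range N).foldl (fun col (i : Nat) =>
    if lm ((i : Int), (j : Int)) ≠ -1 then PySem.Set.add col (lm ((i : Int), (j : Int)))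
    else col) (PySem.Set.empty : PySem.Set Int) with hcoldef
  have hcolmem' : ∀ v, v ∈ col ↔ ∃ i : Nat, i < N ∧ lm ((i : Int), (j : Int)) = v ∧ v ≠ -1 := by
    intro v
    rw [hcolmem v]
    simp [PySem.Set.empty, List.mem_range]
  obtain ⟨hsnd, hsmem⟩ := pvSeeds_spec land N j
  set seeds := (List.range N).filterMap (fun (i : Nat) =>
    if pvCellAt land (i : Int) (j : Int) = 1 then some ((i : Int), (j : Int)) else none) with hseedsdef
  -- every column label is a genuine class index
  have hform : ∀ v ∈ col, ∃ kn : Nat, ∃ _ : kn < reps.length, v = (kn : Int) := by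
    intro v hv
    obtain ⟨i, hi, hlm, hne⟩ := (hcolmem' v).mp hv
    have hmemv : ((i : Int), (j : Int)) ∈ vis := by
      by_contra hnot
      exact hne (hlm ▸ i6 _ hnot)
    obtain ⟨kn, hk, hr⟩ := (i4 _).mp hmemv
    exact ⟨kn, hk, by rw [← hlm]; exact i5 kn hk _ hr⟩
  have hsum := pvSum_classes land (N : Int) (M : Int) reps lvol i2 i3 i7 col hcolnd hform
  have hifelim : (if col ≠ [] then col.foldl (fun s v => s + lvol.getD v 0) 0 else 0)
      = col.foldl (fun s v => s + lvol.getD v 0) 0 := by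
    by_cases h : col = []
    · simp [h]
    · simp [h]
  -- B's side
  have hseedsgood : ∀ c ∈ seeds, pvGood land (N : Int) (M : Int) c := by
    intro c hc
    obtain ⟨i, hi, rfl, h1⟩ := (hsmem c).mp hc
    exact ⟨by simp, by show (i : Int) < (N : Int); exact_mod_cast hi, by simp,
      by show (j : Int) < (M : Int); exact_mod_cast hj, h1⟩
  have hspec := bfsA_spec land (N : Int) (M : Int) 0 seeds seeds (fun _ => (-1 : Int)) 0
    (fun c hc => hc) hsnd hsnd hseedsgood (fun c hc => Or.inl hc)
  obtain ⟨c1, c2, c3, c4, c5, c6, c7⟩ := hspec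
  have hBeq := bfsB_eq land (N : Int) (M : Int) 0 seeds seeds 0 (fun _ => (-1 : Int))
  have htarget : {c | c ∈ (bfsA land (N : Int) (M : Int) 0 seeds seeds (fun _ => (-1 : Int)) 0).1}
      = pvUnionS land (N : Int) (M : Int) reps col := by
    ext c
    simp only [Set.mem_setOf_eq]
    constructor
    · intro hc
      rcases c4 c hc with h | h
      · -- c itself is a seed
        obtain ⟨kn, hk, hr⟩ := (i4 c).mp (icov c (hseedsgood c h))
        obtain ⟨i, hi, rfl, hcell⟩ := (hsmem c).mp h
        refine ⟨kn, hk, (hcolmem' _).mpr ⟨i, hi, i5 kn hk _ hr, by omega⟩, hr⟩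
      · obtain ⟨t, ht, hr⟩ := h
        obtain ⟨kn, hk, hrt⟩ := (i4 t).mp (icov t (hseedsgood t ht))
        obtain ⟨i, hi, rfl, hcell⟩ := (hsmem t).mp ht
        refine ⟨kn, hk, (hcolmem' _).mpr ⟨i, hi, i5 kn hk _ hrt, by omega⟩,
          pvReach_trans land _ _ _ _ c hrt hr⟩
    · rintro ⟨kn, hk, hcv, hr⟩
      obtain ⟨i, hi, hlm, hne⟩ := (hcolmem' _).mp hcv
      have hmemv : ((i : Int), (j : Int)) ∈ vis := by
        by_contra hnot
        exact hne (hlm ▸ i6 _ hnot)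
      obtain ⟨kn', hk', hr'⟩ := (i4 _).mp hmemv
      have hkk : kn' = kn := by
        have := i5 kn' hk' _ hr'
        rw [hlm] at this
        exact_mod_cast this.symm
      subst hkk
      have hseedmem : ((i : Int), (j : Int)) ∈ seeds :=
        (hsmem _).mpr ⟨i, hi, rfl, (hvg _ hmemv).2.2.2.2⟩
      have hgoodrep : pvGood land (N : Int) (M : Int) (reps[kn']'hk') :=
        i2 _ (List.getElem_mem hk')
      have hback : pvReach land (N : Int) (M : Int) ((i : Int), (j : Int)) (reps[kn']'hk') :=
        pvReach_symm land _ _ _ _ hgoodrep hr'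
      have hreach : pvReach land (N : Int) (M : Int) ((i : Int), (j : Int)) c :=
        pvReach_trans land _ _ _ _ c hback hr
      exact pvReach_closed land _ _ _ c5 _ c (c1 _ hseedmem) hreach
  have hcount : (bfsA land (N : Int) (M : Int) 0 seeds seeds (fun _ => (-1 : Int)) 0).2.2
      = ((Set.ncard (pvUnionS land (N : Int) (M : Int) reps col)) : Int) := by
    rw [← htarget, pvList_ncard _ c3]
    omega
  rw [hifelim, hsum, hBeq]
  exact hcount.symm

-- ===== VERDICT (by name: the statement is the Claim_ definition above) =====
theorem solution_spec : Claim_equal_solution := by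
  unfold Claim_equal_solution Spec_solution
  intro land _ _
  show solution land = solution_alt land
  have hbr :
      (List.range land.length).foldl (fun (st : List (Int × Int) × ((Int × Int) → Int) × PySem.Dict Int Int × Int) (i : Nat) =>
        (List.range land.headI.length).foldl (fun (st : List (Int × Int) × ((Int × Int) → Int) × PySem.Dict Int Int × Int) (j : Nat) =>
          if ((i : Int), (j : Int)) ∉ st.1 ∧ pvCellAt land (i : Int) (j : Int) = 1 then
            ((bfsA land (land.length : Int) (land.headI.length : Int) st.2.2.2
                [((i : Int), (j : Int))] (((i : Int), (j : Int)) :: st.1)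
                (fun b => if b = ((i : Int), (j : Int)) then st.2.2.2 else st.2.1 b) 0).1,
             (bfsA land (land.length : Int) (land.headI.length : Int) st.2.2.2
                [((i : Int), (j : Int))] (((i : Int), (j : Int)) :: st.1)
                (fun b => if b = ((i : Int), (j : Int)) then st.2.2.2 else st.2.1 b) 0).2.1,
             st.2.2.1.insert st.2.2.2 (bfsA land (land.length : Int) (land.headI.length : Int) st.2.2.2
                [((i : Int), (j : Int))] (((i : Int), (j : Int)) :: st.1)
                (fun b => if b = ((i : Int), (j : Int)) then st.2.2.2 else st.2.1 b) 0).2.2,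
             st.2.2.2 + 1)
          else st) st)
        (([] : List (Int × Int)), (fun _ => (-1 : Int)), (PySem.Dict.empty : PySem.Dict Int Int), (0 : Int))
      = (pvGridL (land.length : Int) (land.headI.length : Int)).foldl (fun (st : List (Int × Int) × ((Int × Int) → Int) × PySem.Dict Int Int × Int) (c : Int × Int) =>
          if (c.1, c.2) ∉ st.1 ∧ pvCellAt land c.1 c.2 = 1 then
            ((bfsA land (land.length : Int) (land.headI.length : Int) st.2.2.2
                [(c.1, c.2)] ((c.1, c.2) :: st.1)
                (fun b => if b = (c.1, c.2) then st.2.2.2 else st.2.1 b) 0).1,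
             (bfsA land (land.length : Int) (land.headI.length : Int) st.2.2.2
                [(c.1, c.2)] ((c.1, c.2) :: st.1)
                (fun b => if b = (c.1, c.2) then st.2.2.2 else st.2.1 b) 0).2.1,
             st.2.2.1.insert st.2.2.2 (bfsA land (land.length : Int) (land.headI.length : Int) st.2.2.2
                [(c.1, c.2)] ((c.1, c.2) :: st.1)
                (fun b => if b = (c.1, c.2) then st.2.2.2 else st.2.1 b) 0).2.2,
             st.2.2.2 + 1)
          else st)
        (([] : List (Int × Int)), (fun _ => (-1 : Int)), (PySem.Dict.empty : PySem.Dict Int Int), (0 : Int)) :=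
    pvFoldl_grid land.length land.headI.length
      (fun (st : List (Int × Int) × ((Int × Int) → Int) × PySem.Dict Int Int × Int) (y x : Int) =>
          if (y, x) ∉ st.1 ∧ pvCellAt land y x = 1 then
            ((bfsA land (land.length : Int) (land.headI.length : Int) st.2.2.2
                [(y, x)] ((y, x) :: st.1)
                (fun b => if b = (y, x) then st.2.2.2 else st.2.1 b) 0).1,
             (bfsA land (land.length : Int) (land.headI.length : Int) st.2.2.2
                [(y, x)] ((y, x) :: st.1)
                (fun b => if b = (y, x) then st.2.2.2 else st.2.1 b) 0).2.1,
             st.2.2.1.insert st.2.2.2 (bfsA land (land.length : Int) (land.headI.length : Int) st.2.2.2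
                [(y, x)] ((y, x) :: st.1)
                (fun b => if b = (y, x) then st.2.2.2 else st.2.1 b) 0).2.2,
             st.2.2.2 + 1)
          else st) _
  have hinv := pvFoldl_inv
    (fun pre st => pvInv land (land.length : Int) (land.headI.length : Int) pre st)
    (fun (st : List (Int × Int) × ((Int × Int) → Int) × PySem.Dict Int Int × Int) (c : Int × Int) =>
          if (c.1, c.2) ∉ st.1 ∧ pvCellAt land c.1 c.2 = 1 then
            ((bfsA land (land.length : Int) (land.headI.length : Int) st.2.2.2
                [(c.1, c.2)] ((c.1, c.2) :: st.1)
                (fun b => if b = (c.1, c.2) then st.2.2.2 else st.2.1 b) 0).1,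
             (bfsA land (land.length : Int) (land.headI.length : Int) st.2.2.2
                [(c.1, c.2)] ((c.1, c.2) :: st.1)
                (fun b => if b = (c.1, c.2) then st.2.2.2 else st.2.1 b) 0).2.1,
             st.2.2.1.insert st.2.2.2 (bfsA land (land.length : Int) (land.headI.length : Int) st.2.2.2
                [(c.1, c.2)] ((c.1, c.2) :: st.1)
                (fun b => if b = (c.1, c.2) then st.2.2.2 else st.2.1 b) 0).2.2,
             st.2.2.2 + 1)
          else st)
    (pvGridL (land.length : Int) (land.headI.length : Int)) []
    (([] : List (Int × Int)), (fun _ => (-1 : Int)), (PySem.Dict.empty : PySem.Dict Int Int), (0 : Int))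
    (fun pre' st' c hc h =>
      pvInv_step land (land.length : Int) (land.headI.length : Int) pre' st' c.1 c.2
        ((mem_pvGridL (land.length : Int) (land.headI.length : Int) c).mp hc) h)
    (pvInv_init land (land.length : Int) (land.headI.length : Int))
  rw [List.nil_append] at hinv
  show (List.range land.headI.length).foldl (fun total (j : Nat) =>
      max total
        (if ((List.range land.length).foldl (fun col (i : Nat) =>
            if ((List.range land.length).foldl (fun (st : List (Int × Int) × ((Int × Int) → Int) × PySem.Dict Int Int × Int) (i : Nat) =>
        (List.range land.headI.length).foldl (fun (st : List (Int × Int) × ((Int × Int) → Int) × PySem.Dict Int Int × Int) (j : Nat) =>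
          if ((i : Int), (j : Int)) ∉ st.1 ∧ pvCellAt land (i : Int) (j : Int) = 1 then
            ((bfsA land (land.length : Int) (land.headI.length : Int) st.2.2.2
                [((i : Int), (j : Int))] (((i : Int), (j : Int)) :: st.1)
                (fun b => if b = ((i : Int), (j : Int)) then st.2.2.2 else st.2.1 b) 0).1,
             (bfsA land (land.length : Int) (land.headI.length : Int) st.2.2.2
                [((i : Int), (j : Int))] (((i : Int), (j : Int)) :: st.1)
                (fun b => if b = ((i : Int), (j : Int)) then st.2.2.2 else st.2.1 b) 0).2.1,
             st.2.2.1.insert st.2.2.2 (bfsA land (land.length : Int) (land.headI.length : Int) st.2.2.2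
                [((i : Int), (j : Int))] (((i : Int), (j : Int)) :: st.1)
                (fun b => if b = ((i : Int), (j : Int)) then st.2.2.2 else st.2.1 b) 0).2.2,
             st.2.2.2 + 1)
          else st) st)
        (([] : List (Int × Int)), (fun _ => (-1 : Int)), (PySem.Dict.empty : PySem.Dict Int Int), (0 : Int))).2.1 ((i : Int), (j : Int)) ≠ -1 then
              PySem.Set.add col (((List.range land.length).foldl (fun (st : List (Int × Int) × ((Int × Int) → Int) × PySem.Dict Int Int × Int) (i : Nat) =>
        (List.range land.headI.length).foldl (fun (st : List (Int × Int) × ((Int × Int) → Int) × PySem.Dict Int Int × Int) (j : Nat) =>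
          if ((i : Int), (j : Int)) ∉ st.1 ∧ pvCellAt land (i : Int) (j : Int) = 1 then
            ((bfsA land (land.length : Int) (land.headI.length : Int) st.2.2.2
                [((i : Int), (j : Int))] (((i : Int), (j : Int)) :: st.1)
                (fun b => if b = ((i : Int), (j : Int)) then st.2.2.2 else st.2.1 b) 0).1,
             (bfsA land (land.length : Int) (land.headI.length : Int) st.2.2.2
                [((i : Int), (j : Int))] (((i : Int), (j : Int)) :: st.1)
                (fun b => if b = ((i : Int), (j : Int)) then st.2.2.2 else st.2.1 b) 0).2.1,
             st.2.2.1.insert st.2.2.2 (bfsA land (land.length : Int) (land.headI.length : Int) st.2.2.2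
                [((i : Int), (j : Int))] (((i : Int), (j : Int)) :: st.1)
                (fun b => if b = ((i : Int), (j : Int)) then st.2.2.2 else st.2.1 b) 0).2.2,
             st.2.2.2 + 1)
          else st) st)
        (([] : List (Int × Int)), (fun _ => (-1 : Int)), (PySem.Dict.empty : PySem.Dict Int Int), (0 : Int))).2.1 ((i : Int), (j : Int)))
            else col) (PySem.Set.empty : PySem.Set Int)) ≠ [] then
          ((List.range land.length).foldl (fun col (i : Nat) =>
            if ((List.range land.length).foldl (fun (st : List (Int × Int) × ((Int × Int) → Int) × PySem.Dict Int Int × Int) (i : Nat) =>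
        (List.range land.headI.length).foldl (fun (st : List (Int × Int) × ((Int × Int) → Int) × PySem.Dict Int Int × Int) (j : Nat) =>
          if ((i : Int), (j : Int)) ∉ st.1 ∧ pvCellAt land (i : Int) (j : Int) = 1 then
            ((bfsA land (land.length : Int) (land.headI.length : Int) st.2.2.2
                [((i : Int), (j : Int))] (((i : Int), (j : Int)) :: st.1)
                (fun b => if b = ((i : Int), (j : Int)) then st.2.2.2 else st.2.1 b) 0).1,
             (bfsA land (land.length : Int) (land.headI.length : Int) st.2.2.2
                [((i : Int), (j : Int))] (((i : Int), (j : Int)) :: st.1)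
                (fun b => if b = ((i : Int), (j : Int)) then st.2.2.2 else st.2.1 b) 0).2.1,
             st.2.2.1.insert st.2.2.2 (bfsA land (land.length : Int) (land.headI.length : Int) st.2.2.2
                [((i : Int), (j : Int))] (((i : Int), (j : Int)) :: st.1)
                (fun b => if b = ((i : Int), (j : Int)) then st.2.2.2 else st.2.1 b) 0).2.2,
             st.2.2.2 + 1)
          else st) st)
        (([] : List (Int × Int)), (fun _ => (-1 : Int)), (PySem.Dict.empty : PySem.Dict Int Int), (0 : Int))).2.1 ((i : Int), (j : Int)) ≠ -1 then
              PySem.Set.add col (((List.range land.length).foldl (fun (st : List (Int × Int) × ((Int × Int) → Int) × PySem.Dict Int Int × Int) (i : Nat) =>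
        (List.range land.headI.length).foldl (fun (st : List (Int × Int) × ((Int × Int) → Int) × PySem.Dict Int Int × Int) (j : Nat) =>
          if ((i : Int), (j : Int)) ∉ st.1 ∧ pvCellAt land (i : Int) (j : Int) = 1 then
            ((bfsA land (land.length : Int) (land.headI.length : Int) st.2.2.2
                [((i : Int), (j : Int))] (((i : Int), (j : Int)) :: st.1)
                (fun b => if b = ((i : Int), (j : Int)) then st.2.2.2 else st.2.1 b) 0).1,
             (bfsA land (land.length : Int) (land.headI.length : Int) st.2.2.2
                [((i : Int), (j : Int))] (((i : Int), (j : Int)) :: st.1)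
                (fun b => if b = ((i : Int), (j : Int)) then st.2.2.2 else st.2.1 b) 0).2.1,
             st.2.2.1.insert st.2.2.2 (bfsA land (land.length : Int) (land.headI.length : Int) st.2.2.2
                [((i : Int), (j : Int))] (((i : Int), (j : Int)) :: st.1)
                (fun b => if b = ((i : Int), (j : Int)) then st.2.2.2 else st.2.1 b) 0).2.2,
             st.2.2.2 + 1)
          else st) st)
        (([] : List (Int × Int)), (fun _ => (-1 : Int)), (PySem.Dict.empty : PySem.Dict Int Int), (0 : Int))).2.1 ((i : Int), (j : Int)))
            else col) (PySem.Set.empty : PySem.Set Int)).foldl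
              (fun s v => s + ((List.range land.length).foldl (fun (st : List (Int × Int) × ((Int × Int) → Int) × PySem.Dict Int Int × Int) (i : Nat) =>
        (List.range land.headI.length).foldl (fun (st : List (Int × Int) × ((Int × Int) → Int) × PySem.Dict Int Int × Int) (j : Nat) =>
          if ((i : Int), (j : Int)) ∉ st.1 ∧ pvCellAt land (i : Int) (j : Int) = 1 then
            ((bfsA land (land.length : Int) (land.headI.length : Int) st.2.2.2
                [((i : Int), (j : Int))] (((i : Int), (j : Int)) :: st.1)
                (fun b => if b = ((i : Int), (j : Int)) then st.2.2.2 else st.2.1 b) 0).1,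
             (bfsA land (land.length : Int) (land.headI.length : Int) st.2.2.2
                [((i : Int), (j : Int))] (((i : Int), (j : Int)) :: st.1)
                (fun b => if b = ((i : Int), (j : Int)) then st.2.2.2 else st.2.1 b) 0).2.1,
             st.2.2.1.insert st.2.2.2 (bfsA land (land.length : Int) (land.headI.length : Int) st.2.2.2
                [((i : Int), (j : Int))] (((i : Int), (j : Int)) :: st.1)
                (fun b => if b = ((i : Int), (j : Int)) then st.2.2.2 else st.2.1 b) 0).2.2,
             st.2.2.2 + 1)
          else st) st)
        (([] : List (Int × Int)), (fun _ => (-1 : Int)), (PySem.Dict.empty : PySem.Dict Int Int), (0 : Int))).2.2.1.getD v 0) 0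
        else 0)) 0
    = (List.range land.headI.length).foldl (fun best (j : Nat) =>
        max best (bfsB land (land.length : Int) (land.headI.length : Int)
          ((List.range land.length).filterMap (fun (i : Nat) =>
        if pvCellAt land (i : Int) (j : Int) = 1 then some ((i : Int), (j : Int)) else none))
          ((List.range land.length).filterMap (fun (i : Nat) =>
        if pvCellAt land (i : Int) (j : Int) = 1 then some ((i : Int), (j : Int)) else none))
          0).2) 0
  rw [hbr]
  set stF := (pvGridL (land.length : Int) (land.headI.length : Int)).foldl
    (fun (st : List (Int × Int) × ((Int × Int) → Int) × PySem.Dict Int Int × Int) (c : Int × Int) =>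
          if (c.1, c.2) ∉ st.1 ∧ pvCellAt land c.1 c.2 = 1 then
            ((bfsA land (land.length : Int) (land.headI.length : Int) st.2.2.2
                [(c.1, c.2)] ((c.1, c.2) :: st.1)
                (fun b => if b = (c.1, c.2) then st.2.2.2 else st.2.1 b) 0).1,
             (bfsA land (land.length : Int) (land.headI.length : Int) st.2.2.2
                [(c.1, c.2)] ((c.1, c.2) :: st.1)
                (fun b => if b = (c.1, c.2) then st.2.2.2 else st.2.1 b) 0).2.1,
             st.2.2.1.insert st.2.2.2 (bfsA land (land.length : Int) (land.headI.length : Int) st.2.2.2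
                [(c.1, c.2)] ((c.1, c.2) :: st.1)
                (fun b => if b = (c.1, c.2) then st.2.2.2 else st.2.1 b) 0).2.2,
             st.2.2.2 + 1)
          else st)
    (([] : List (Int × Int)), (fun _ => (-1 : Int)), (PySem.Dict.empty : PySem.Dict Int Int), (0 : Int))
    with hstF
  obtain ⟨reps, i1, i2, i3, i4, i5, i6, i7, i8, i9⟩ := hinv
  have icov : ∀ c, pvGood land (land.length : Int) (land.headI.length : Int) c → c ∈ stF.1 :=
    fun c hgc => i9 c ((mem_pvGridL _ _ c).mpr ⟨hgc.1, hgc.2.1, hgc.2.2.1, hgc.2.2.2.1⟩) hgc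
  apply PySem.List.foldl_congr_mem
  intro acc j hjmem
  have hj := List.mem_range.mp hjmem
  exact congrArg (fun z => max acc z)
    (pvColumn_eq land land.length land.headI.length j hj reps _ _ _ i2 i3 i4 i5 i6 i7 icov)
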